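-- pv_equiv track=rewrite | github.com/satishk01/kiro-opensource-code | new_project_app.py | detect_coding_standards_fallback
-- ===== SOURCE A (Python) =====
-- def detect_coding_standards_fallback(files):
--     """Auto-detect coding standards from project files"""
--     standards = {}
--
--     # Check for linting configurations
--     linting_standards = []
--     if '.eslintrc.json' in files or '.eslintrc.js' in files or '.eslintrc' in files:
--         linting_standards.append("ESLint configuration detected")
--     if '.pylintrc' in files or 'pylint.cfg' in files:
--         linting_standards.append("Pylint configuration detected")
--     if '.rubocop.yml' in files:
--         linting_standards.append("RuboCop configuration detected")
--
--     if linting_standards: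
--         standards["Linting"] = linting_standards
--
--     # Check for formatting configurations
--     formatting_standards = []
--     if '.prettierrc' in files or 'prettier.config.js' in files or '.prettierrc.json' in files:
--         formatting_standards.append("Prettier code formatting")
--     if 'pyproject.toml' in files and 'black' in files.get('pyproject.toml', ''):
--         formatting_standards.append("Black Python formatter")
--     if '.editorconfig' in files:
--         formatting_standards.append("EditorConfig for consistent formatting")
--
--     if formatting_standards:
--         standards["Code Formatting"] = formatting_standards
--
--     # Check for testing frameworks
--     testing_standards = []
--     if 'jest.config.js' in files or ('"jest"' in files.get('package.json', '')):
--         testing_standards.append("Jest testing framework")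
--     if 'pytest.ini' in files or ('pytest' in files.get('requirements.txt', '')):
--         testing_standards.append("Pytest testing framework")
--     if 'Gemfile' in files and 'rspec' in files.get('Gemfile', ''):
--         testing_standards.append("RSpec testing framework")
--
--     if testing_standards:
--         standards["Testing"] = testing_standards
--
--     # Check for documentation standards
--     documentation_standards = []
--     if 'README.md' in files or 'readme.md' in files:
--         documentation_standards.append("README documentation")
--     if any('docs/' in path for path in files.keys()):
--         documentation_standards.append("Dedicated documentation directory")
--     if 'CONTRIBUTING.md' in files:
--         documentation_standards.append("Contribution guidelines")
--
--     if documentation_standards: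
--         standards["Documentation"] = documentation_standards
--
--     return standards
-- ===== SOURCE B (Python) =====
-- def detect_coding_standards_fallback(files):
--     """Auto-detect coding standards from project files.
--
--     Single pass: classify each file entry into signal tags, collect into a set,
--     then render the report from a static (category, [(signal, message)]) table.
--     """
--     def signals_of(path, content):
--         return (
--             (['eslint'] if path in ('.eslintrc.json', '.eslintrc.js', '.eslintrc') else [])
--             + (['pylint'] if path in ('.pylintrc', 'pylint.cfg') else [])
--             + (['rubocop'] if path == '.rubocop.yml' else [])
--             + (['prettier'] if path in ('.prettierrc', 'prettier.config.js', '.prettierrc.json') else [])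
--             + (['black'] if path == 'pyproject.toml' and 'black' in content else [])
--             + (['editorconfig'] if path == '.editorconfig' else [])
--             + (['jest'] if path == 'jest.config.js' or (path == 'package.json' and '"jest"' in content) else [])
--             + (['pytest'] if path == 'pytest.ini' or (path == 'requirements.txt' and 'pytest' in content) else [])
--             + (['rspec'] if path == 'Gemfile' and 'rspec' in content else [])
--             + (['readme'] if path in ('README.md', 'readme.md') else [])
--             + (['docsdir'] if 'docs/' in path else [])
--             + (['contributing'] if path == 'CONTRIBUTING.md' else [])
--         )
--
--     signals = set()
--     for path, content in files.items():
--         signals.update(signals_of(path, content))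
--
--     table = [
--         ("Linting", [('eslint', "ESLint configuration detected"),
--                      ('pylint', "Pylint configuration detected"),
--                      ('rubocop', "RuboCop configuration detected")]),
--         ("Code Formatting", [('prettier', "Prettier code formatting"),
--                              ('black', "Black Python formatter"),
--                              ('editorconfig', "EditorConfig for consistent formatting")]),
--         ("Testing", [('jest', "Jest testing framework"),
--                      ('pytest', "Pytest testing framework"),
--                      ('rspec', "RSpec testing framework")]),
--         ("Documentation", [('readme', "README documentation"),
--                            ('docsdir', "Dedicated documentation directory"),
--                            ('contributing', "Contribution guidelines")]),
--     ]
--     standards = {}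
--     for category, rules in table:
--         msgs = [msg for sig, msg in rules if sig in signals]
--         if msgs:
--             standards[category] = msgs
--     return standards
-- ===== Notes on version B (the rewrite author's own statement) =====
-- stated objective: alternative
-- what changed: Inverted the traversal: instead of A's twelve dict membership/content probes grouped in four hand-written blocks, B makes a single pass over the file entries classifying each into signal tags collected in a set, then renders the result from a static (category, [(signal, message)]) table.
import Mathlib
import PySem

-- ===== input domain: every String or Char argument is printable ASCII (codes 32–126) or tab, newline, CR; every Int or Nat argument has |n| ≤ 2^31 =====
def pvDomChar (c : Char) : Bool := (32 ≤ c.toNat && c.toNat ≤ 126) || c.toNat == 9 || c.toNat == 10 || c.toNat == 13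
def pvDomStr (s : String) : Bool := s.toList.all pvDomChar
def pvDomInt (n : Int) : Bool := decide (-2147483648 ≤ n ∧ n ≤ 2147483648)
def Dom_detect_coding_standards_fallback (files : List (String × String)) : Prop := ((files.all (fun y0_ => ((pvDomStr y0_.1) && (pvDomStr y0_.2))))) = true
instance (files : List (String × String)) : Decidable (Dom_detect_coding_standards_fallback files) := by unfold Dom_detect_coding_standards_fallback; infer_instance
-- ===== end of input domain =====

-- B inverts the traversal: one pass over the file entries collects signal tags in a set, and a
-- static (category, [(signal, message)]) table renders the report; objective: alternative.
-- Return value only; neither program mutates its argument.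

-- ===== PORT A =====
def detect_coding_standards_fallback (files : List (String × String)) : List (String × List String) :=
  let f := PySem.Dict.ofList files
  let standards : PySem.Dict String (List String) := PySem.Dict.empty
  let linting : List String := []
  let linting := if f.contains ".eslintrc.json" || f.contains ".eslintrc.js" || f.contains ".eslintrc" then linting ++ ["ESLint configuration detected"] else linting
  let linting := if f.contains ".pylintrc" || f.contains "pylint.cfg" then linting ++ ["Pylint configuration detected"] else linting
  let linting := if f.contains ".rubocop.yml" then linting ++ ["RuboCop configuration detected"] else linting
  let standards := if linting ≠ [] then standards.insert "Linting" linting else standards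
  let formatting : List String := []
  let formatting := if f.contains ".prettierrc" || f.contains "prettier.config.js" || f.contains ".prettierrc.json" then formatting ++ ["Prettier code formatting"] else formatting
  let formatting := if f.contains "pyproject.toml" && PySem.Str.isIn "black" (f.getD "pyproject.toml" "") then formatting ++ ["Black Python formatter"] else formatting
  let formatting := if f.contains ".editorconfig" then formatting ++ ["EditorConfig for consistent formatting"] else formatting
  let standards := if formatting ≠ [] then standards.insert "Code Formatting" formatting else standards
  let testing : List String := []
  let testing := if f.contains "jest.config.js" || PySem.Str.isIn "\"jest\"" (f.getD "package.json" "") then testing ++ ["Jest testing framework"] else testing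
  let testing := if f.contains "pytest.ini" || PySem.Str.isIn "pytest" (f.getD "requirements.txt" "") then testing ++ ["Pytest testing framework"] else testing
  let testing := if f.contains "Gemfile" && PySem.Str.isIn "rspec" (f.getD "Gemfile" "") then testing ++ ["RSpec testing framework"] else testing
  let standards := if testing ≠ [] then standards.insert "Testing" testing else standards
  let documentation : List String := []
  let documentation := if f.contains "README.md" || f.contains "readme.md" then documentation ++ ["README documentation"] else documentation
  let documentation := if f.keys.any (fun path => PySem.Str.isIn "docs/" path) then documentation ++ ["Dedicated documentation directory"] else documentation
  let documentation := if f.contains "CONTRIBUTING.md" then documentation ++ ["Contribution guidelines"] else documentation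
  let standards := if documentation ≠ [] then standards.insert "Documentation" documentation else standards
  standards.items

-- ===== PORT B =====
-- signals_of: classify ONE file entry into signal tags (per-entry tests only)
def pvSignalsOf (path content : String) : List String :=
  (if path == ".eslintrc.json" || path == ".eslintrc.js" || path == ".eslintrc" then ["eslint"] else [])
  ++ (if path == ".pylintrc" || path == "pylint.cfg" then ["pylint"] else [])
  ++ (if path == ".rubocop.yml" then ["rubocop"] else [])
  ++ (if path == ".prettierrc" || path == "prettier.config.js" || path == ".prettierrc.json" then ["prettier"] else [])
  ++ (if path == "pyproject.toml" && PySem.Str.isIn "black" content then ["black"] else [])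
  ++ (if path == ".editorconfig" then ["editorconfig"] else [])
  ++ (if path == "jest.config.js" || (path == "package.json" && PySem.Str.isIn "\"jest\"" content) then ["jest"] else [])
  ++ (if path == "pytest.ini" || (path == "requirements.txt" && PySem.Str.isIn "pytest" content) then ["pytest"] else [])
  ++ (if path == "Gemfile" && PySem.Str.isIn "rspec" content then ["rspec"] else [])
  ++ (if path == "README.md" || path == "readme.md" then ["readme"] else [])
  ++ (if PySem.Str.isIn "docs/" path then ["docsdir"] else [])
  ++ (if path == "CONTRIBUTING.md" then ["contributing"] else [])

def pvTable : List (String × List (String × String)) :=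
  [("Linting",
     [("eslint", "ESLint configuration detected"),
      ("pylint", "Pylint configuration detected"),
      ("rubocop", "RuboCop configuration detected")]),
   ("Code Formatting",
     [("prettier", "Prettier code formatting"),
      ("black", "Black Python formatter"),
      ("editorconfig", "EditorConfig for consistent formatting")]),
   ("Testing",
     [("jest", "Jest testing framework"),
      ("pytest", "Pytest testing framework"),
      ("rspec", "RSpec testing framework")]),
   ("Documentation",
     [("readme", "README documentation"),
      ("docsdir", "Dedicated documentation directory"),
      ("contributing", "Contribution guidelines")])]

def detect_coding_standards_fallback_alt (files : List (String × String)) : List (String × List String) :=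
  let f := PySem.Dict.ofList files
  let signals : PySem.Set String :=
    f.items.foldl (fun s e => PySem.Set.update s (pvSignalsOf e.1 e.2)) PySem.Set.empty
  pvTable.foldl
    (fun (acc : List (String × List String)) (rule : String × List (String × String)) =>
      let msgs : List String := (rule.2.filter (fun r => PySem.Set.contains signals r.1)).map (fun r => r.2)
      if msgs ≠ ([] : List String) then acc ++ [(rule.1, msgs)] else acc)
    ([] : List (String × List String))

-- ===== PRECONDITION & SPEC =====
def Spec_detect_coding_standards_fallback (files : List (String × String)) (out : List (String × List String)) : Prop := out = detect_coding_standards_fallback_alt files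
instance (files : List (String × String)) (out : List (String × List String)) : Decidable (Spec_detect_coding_standards_fallback files out) := by unfold Spec_detect_coding_standards_fallback; infer_instance

-- ===== CLAIM (what is proved, stated in full; the proofs are below) =====
def Claim_equal_detect_coding_standards_fallback : Prop := ∀ (files : List (String × String)), Dom_detect_coding_standards_fallback files → Spec_detect_coding_standards_fallback files (detect_coding_standards_fallback files)

-- ===== LEMMAS AND PROOFS =====

theorem pv_mem_fold_update (l : List (String × String)) (s : PySem.Set String) (n : String) :
    n ∈ l.foldl (fun s e => PySem.Set.update s (pvSignalsOf e.1 e.2)) s ↔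
      n ∈ s ∨ ∃ e ∈ l, n ∈ pvSignalsOf e.1 e.2 := by
  induction l generalizing s with
  | nil => simp
  | cons e t ih =>
    simp only [List.foldl_cons, ih, PySem.Set.mem_update, List.mem_cons]
    constructor
    · rintro (⟨h | h⟩ | ⟨e', he', h⟩)
      · exact Or.inl h
      · exact Or.inr ⟨e, Or.inl rfl, h⟩
      · exact Or.inr ⟨e', Or.inr he', h⟩
    · rintro (h | ⟨e', (rfl | he'), h⟩)
      · exact Or.inl (Or.inl h)
      · exact Or.inl (Or.inr h)
      · exact Or.inr ⟨e', he', h⟩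

theorem pv_items_exists_iff (d : PySem.Dict String String) (hnd : d.keys.Nodup)
    (k : String) (p : String → Bool) :
    (∃ e ∈ d.items, e.1 = k ∧ p e.2 = true) ↔ (d.contains k = true ∧ p (d.getD k "") = true) := by
  constructor
  · rintro ⟨⟨k', v⟩, he, rfl, hp⟩
    refine ⟨(PySem.Dict.contains_iff_mem_keys d k').2 (PySem.Dict.mem_keys_of_mem_items d he), ?_⟩
    rwa [PySem.Dict.getD_of_mem_items d he hnd]
  · rintro ⟨hc, hp⟩
    have hk := (PySem.Dict.contains_iff_mem_keys d k).1 hc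
    have hv : ∃ v, (k, v) ∈ d.items := by
      simpa [PySem.Dict.keys, List.mem_map, Prod.ext_iff, eq_comm] using hk
    rcases hv with ⟨v, hv⟩
    refine ⟨(k, v), hv, rfl, ?_⟩
    have hg := PySem.Dict.getD_of_mem_items d hv hnd ""
    simpa [hg] using hp

theorem pv_exists_key (d : PySem.Dict String String) (hnd : d.keys.Nodup) (k : String) :
    (∃ e ∈ d.items, e.1 = k) ↔ d.contains k = true := by
  simpa using pv_items_exists_iff d hnd k (fun _ => true)


theorem pv_sig_iff (files : List (String × String)) (n : String) :
    PySem.Set.contains ((PySem.Dict.ofList files).items.foldl (fun s e => PySem.Set.update s (pvSignalsOf e.1 e.2)) PySem.Set.empty) n = true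
      ↔ ∃ e ∈ (PySem.Dict.ofList files).items, n ∈ pvSignalsOf e.1 e.2 := by
  rw [PySem.Set.contains_iff, pv_mem_fold_update]
  simp [PySem.Set.empty]

theorem pv_c_eslint (files : List (String × String)) :
    PySem.Set.contains ((PySem.Dict.ofList files).items.foldl (fun s e => PySem.Set.update s (pvSignalsOf e.1 e.2)) PySem.Set.empty) "eslint"
      = ((PySem.Dict.ofList files).contains ".eslintrc.json" || (PySem.Dict.ofList files).contains ".eslintrc.js" || (PySem.Dict.ofList files).contains ".eslintrc") := by
  rw [Bool.eq_iff_iff, pv_sig_iff]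
  simp [pvSignalsOf, and_or_left, exists_or, pv_exists_key _ (PySem.Dict.nodup_keys_ofList files), or_assoc]

theorem pv_c_pylint (files : List (String × String)) :
    PySem.Set.contains ((PySem.Dict.ofList files).items.foldl (fun s e => PySem.Set.update s (pvSignalsOf e.1 e.2)) PySem.Set.empty) "pylint"
      = ((PySem.Dict.ofList files).contains ".pylintrc" || (PySem.Dict.ofList files).contains "pylint.cfg") := by
  rw [Bool.eq_iff_iff, pv_sig_iff]
  simp [pvSignalsOf, and_or_left, exists_or, pv_exists_key _ (PySem.Dict.nodup_keys_ofList files), or_assoc]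

theorem pv_c_rubocop (files : List (String × String)) :
    PySem.Set.contains ((PySem.Dict.ofList files).items.foldl (fun s e => PySem.Set.update s (pvSignalsOf e.1 e.2)) PySem.Set.empty) "rubocop"
      = (PySem.Dict.ofList files).contains ".rubocop.yml" := by
  rw [Bool.eq_iff_iff, pv_sig_iff]
  simp [pvSignalsOf, pv_exists_key _ (PySem.Dict.nodup_keys_ofList files)]

theorem pv_c_prettier (files : List (String × String)) :
    PySem.Set.contains ((PySem.Dict.ofList files).items.foldl (fun s e => PySem.Set.update s (pvSignalsOf e.1 e.2)) PySem.Set.empty) "prettier"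
      = ((PySem.Dict.ofList files).contains ".prettierrc" || (PySem.Dict.ofList files).contains "prettier.config.js" || (PySem.Dict.ofList files).contains ".prettierrc.json") := by
  rw [Bool.eq_iff_iff, pv_sig_iff]
  simp [pvSignalsOf, and_or_left, exists_or, pv_exists_key _ (PySem.Dict.nodup_keys_ofList files), or_assoc]

theorem pv_c_black (files : List (String × String)) :
    PySem.Set.contains ((PySem.Dict.ofList files).items.foldl (fun s e => PySem.Set.update s (pvSignalsOf e.1 e.2)) PySem.Set.empty) "black"
      = ((PySem.Dict.ofList files).contains "pyproject.toml" && PySem.Str.isIn "black" ((PySem.Dict.ofList files).getD "pyproject.toml" "")) := by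
  rw [Bool.eq_iff_iff, pv_sig_iff]
  simp only [Bool.and_eq_true, ← pv_items_exists_iff _ (PySem.Dict.nodup_keys_ofList files)]
  simp [pvSignalsOf]

theorem pv_c_editorconfig (files : List (String × String)) :
    PySem.Set.contains ((PySem.Dict.ofList files).items.foldl (fun s e => PySem.Set.update s (pvSignalsOf e.1 e.2)) PySem.Set.empty) "editorconfig"
      = (PySem.Dict.ofList files).contains ".editorconfig" := by
  rw [Bool.eq_iff_iff, pv_sig_iff]
  simp [pvSignalsOf, pv_exists_key _ (PySem.Dict.nodup_keys_ofList files)]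

theorem pv_c_jest (files : List (String × String)) :
    PySem.Set.contains ((PySem.Dict.ofList files).items.foldl (fun s e => PySem.Set.update s (pvSignalsOf e.1 e.2)) PySem.Set.empty) "jest"
      = ((PySem.Dict.ofList files).contains "jest.config.js" || PySem.Str.isIn "\"jest\"" ((PySem.Dict.ofList files).getD "package.json" "")) := by
  have hnd := PySem.Dict.nodup_keys_ofList (ν := String) files
  rw [Bool.eq_iff_iff, pv_sig_iff]
  have hmem : ∀ p c : String, ("jest" ∈ pvSignalsOf p c) ↔ (p = "jest.config.js" ∨ (p = "package.json" ∧ PySem.Str.isIn "\"jest\"" c = true)) := by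
    intro p c; simp [pvSignalsOf]
  simp only [hmem, Bool.or_eq_true]
  constructor
  · rintro ⟨e, he, (h1 | ⟨h2, h3⟩)⟩
    · exact Or.inl ((pv_exists_key _ hnd _).1 ⟨e, he, h1⟩)
    · exact Or.inr ((pv_items_exists_iff _ hnd "package.json" (fun c => PySem.Str.isIn "\"jest\"" c)).1 ⟨e, he, h2, h3⟩).2
  · rintro (h | h)
    · rcases (pv_exists_key _ hnd "jest.config.js").2 h with ⟨e, he, h1⟩
      exact ⟨e, he, Or.inl h1⟩
    · by_cases hc : (PySem.Dict.ofList files).contains "package.json" = true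
      · rcases ((pv_items_exists_iff _ hnd "package.json" (fun c => PySem.Str.isIn "\"jest\"" c)).2 ⟨hc, h⟩ : _) with ⟨e, he, h2, h3⟩
        exact ⟨e, he, Or.inr ⟨h2, h3⟩⟩
      · exfalso
        have hg : (PySem.Dict.ofList files).getD "package.json" "" = "" :=
          PySem.Dict.getD_of_not_contains _ "" (by simpa using hc)
        rw [hg] at h
        exact absurd h (by decide)

theorem pv_c_pytest (files : List (String × String)) :
    PySem.Set.contains ((PySem.Dict.ofList files).items.foldl (fun s e => PySem.Set.update s (pvSignalsOf e.1 e.2)) PySem.Set.empty) "pytest"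
      = ((PySem.Dict.ofList files).contains "pytest.ini" || PySem.Str.isIn "pytest" ((PySem.Dict.ofList files).getD "requirements.txt" "")) := by
  have hnd := PySem.Dict.nodup_keys_ofList (ν := String) files
  rw [Bool.eq_iff_iff, pv_sig_iff]
  have hmem : ∀ p c : String, ("pytest" ∈ pvSignalsOf p c) ↔ (p = "pytest.ini" ∨ (p = "requirements.txt" ∧ PySem.Str.isIn "pytest" c = true)) := by
    intro p c; simp [pvSignalsOf]
  simp only [hmem, Bool.or_eq_true]
  constructor
  · rintro ⟨e, he, (h1 | ⟨h2, h3⟩)⟩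
    · exact Or.inl ((pv_exists_key _ hnd _).1 ⟨e, he, h1⟩)
    · exact Or.inr ((pv_items_exists_iff _ hnd "requirements.txt" (fun c => PySem.Str.isIn "pytest" c)).1 ⟨e, he, h2, h3⟩).2
  · rintro (h | h)
    · rcases (pv_exists_key _ hnd "pytest.ini").2 h with ⟨e, he, h1⟩
      exact ⟨e, he, Or.inl h1⟩
    · by_cases hc : (PySem.Dict.ofList files).contains "requirements.txt" = true
      · rcases ((pv_items_exists_iff _ hnd "requirements.txt" (fun c => PySem.Str.isIn "pytest" c)).2 ⟨hc, h⟩ : _) with ⟨e, he, h2, h3⟩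
        exact ⟨e, he, Or.inr ⟨h2, h3⟩⟩
      · exfalso
        have hg : (PySem.Dict.ofList files).getD "requirements.txt" "" = "" :=
          PySem.Dict.getD_of_not_contains _ "" (by simpa using hc)
        rw [hg] at h
        exact absurd h (by decide)

theorem pv_c_rspec (files : List (String × String)) :
    PySem.Set.contains ((PySem.Dict.ofList files).items.foldl (fun s e => PySem.Set.update s (pvSignalsOf e.1 e.2)) PySem.Set.empty) "rspec"
      = ((PySem.Dict.ofList files).contains "Gemfile" && PySem.Str.isIn "rspec" ((PySem.Dict.ofList files).getD "Gemfile" "")) := by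
  rw [Bool.eq_iff_iff, pv_sig_iff]
  simp only [Bool.and_eq_true, ← pv_items_exists_iff _ (PySem.Dict.nodup_keys_ofList files)]
  simp [pvSignalsOf]

theorem pv_c_readme (files : List (String × String)) :
    PySem.Set.contains ((PySem.Dict.ofList files).items.foldl (fun s e => PySem.Set.update s (pvSignalsOf e.1 e.2)) PySem.Set.empty) "readme"
      = ((PySem.Dict.ofList files).contains "README.md" || (PySem.Dict.ofList files).contains "readme.md") := by
  rw [Bool.eq_iff_iff, pv_sig_iff]
  simp [pvSignalsOf, and_or_left, exists_or, pv_exists_key _ (PySem.Dict.nodup_keys_ofList files), or_assoc]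

theorem pv_c_docsdir (files : List (String × String)) :
    PySem.Set.contains ((PySem.Dict.ofList files).items.foldl (fun s e => PySem.Set.update s (pvSignalsOf e.1 e.2)) PySem.Set.empty) "docsdir"
      = (PySem.Dict.ofList files).keys.any (fun path => PySem.Str.isIn "docs/" path) := by
  rw [Bool.eq_iff_iff, pv_sig_iff]
  simp [pvSignalsOf, PySem.Dict.keys, List.any_eq_true]

theorem pv_c_contributing (files : List (String × String)) :
    PySem.Set.contains ((PySem.Dict.ofList files).items.foldl (fun s e => PySem.Set.update s (pvSignalsOf e.1 e.2)) PySem.Set.empty) "contributing"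
      = (PySem.Dict.ofList files).contains "CONTRIBUTING.md" := by
  rw [Bool.eq_iff_iff, pv_sig_iff]
  simp [pvSignalsOf, pv_exists_key _ (PySem.Dict.nodup_keys_ofList files)]

-- ===== VERDICT (by name: the statement is the Claim_ definition above) =====
theorem detect_coding_standards_fallback_spec : Claim_equal_detect_coding_standards_fallback := by
  intro files _
  unfold Spec_detect_coding_standards_fallback
  unfold detect_coding_standards_fallback detect_coding_standards_fallback_alt
  simp only [pvTable, List.foldl_cons, List.foldl_nil, List.filter_cons, List.filter_nil]
  rw [pv_c_eslint, pv_c_pylint, pv_c_rubocop, pv_c_prettier, pv_c_black, pv_c_editorconfig,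
      pv_c_jest, pv_c_pytest, pv_c_rspec, pv_c_readme, pv_c_docsdir, pv_c_contributing]
  generalize ((PySem.Dict.ofList files).contains ".eslintrc.json" || (PySem.Dict.ofList files).contains ".eslintrc.js" || (PySem.Dict.ofList files).contains ".eslintrc") = c1
  generalize ((PySem.Dict.ofList files).contains ".pylintrc" || (PySem.Dict.ofList files).contains "pylint.cfg") = c2
  generalize ((PySem.Dict.ofList files).contains ".rubocop.yml") = c3
  generalize ((PySem.Dict.ofList files).contains ".prettierrc" || (PySem.Dict.ofList files).contains "prettier.config.js" || (PySem.Dict.ofList files).contains ".prettierrc.json") = c4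
  generalize ((PySem.Dict.ofList files).contains "pyproject.toml" && PySem.Str.isIn "black" ((PySem.Dict.ofList files).getD "pyproject.toml" "")) = c5
  generalize ((PySem.Dict.ofList files).contains ".editorconfig") = c6
  generalize ((PySem.Dict.ofList files).contains "jest.config.js" || PySem.Str.isIn "\"jest\"" ((PySem.Dict.ofList files).getD "package.json" "")) = c7
  generalize ((PySem.Dict.ofList files).contains "pytest.ini" || PySem.Str.isIn "pytest" ((PySem.Dict.ofList files).getD "requirements.txt" "")) = c8
  generalize ((PySem.Dict.ofList files).contains "Gemfile" && PySem.Str.isIn "rspec" ((PySem.Dict.ofList files).getD "Gemfile" "")) = c9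
  generalize ((PySem.Dict.ofList files).contains "README.md" || (PySem.Dict.ofList files).contains "readme.md") = c10
  generalize ((PySem.Dict.ofList files).keys.any (fun path => PySem.Str.isIn "docs/" path)) = c11
  generalize ((PySem.Dict.ofList files).contains "CONTRIBUTING.md") = c12
  revert c1 c2 c3 c4 c5 c6 c7 c8 c9 c10 c11 c12
  decide
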